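-- pv_equiv track=rewrite | github.com/chenyingthu/CloudPSS_skillhub | cloudpss_skills_v2/tools/topology_check.py | _find_isolated_generators
-- ===== SOURCE A (Python) =====
-- def _find_isolated_generators(
--     buses: list, generators: list, adj: dict
-- ) -> list[str]:
--     isolated = []
--     for gen in generators:
--         bus = gen.get("bus")
--         if bus and bus in adj:
--             if not adj[bus]:
--                 isolated.append(gen.get("name", bus))
--         elif bus:
--             isolated.append(gen.get("name", bus))
--     return isolated
-- ===== SOURCE B (Python) =====
-- def _find_isolated_generators(
--     buses: list, generators: list, adj: dict
-- ) -> list[str]: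
--     # Recursive decomposition: head generator + recursion on the tail,
--     # building the result front-to-back by consing onto the recursive result.
--     if not generators:
--         return []
--     rest = _find_isolated_generators(buses, generators[1:], adj)
--     gen = generators[0]
--     bus = gen.get("bus")
--     if bus and not adj.get(bus):
--         return [gen.get("name", bus)] + rest
--     return rest
-- ===== Notes on version B (the rewrite author's own statement) =====
-- stated objective: alternative
-- what changed: Replaces A's iterative loop with accumulator-append by structural recursion on the generator list (head case consed onto the recursive tail result), and collapses A's nested if/elif into a single condition via adj.get truthiness.
import Mathlib
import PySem

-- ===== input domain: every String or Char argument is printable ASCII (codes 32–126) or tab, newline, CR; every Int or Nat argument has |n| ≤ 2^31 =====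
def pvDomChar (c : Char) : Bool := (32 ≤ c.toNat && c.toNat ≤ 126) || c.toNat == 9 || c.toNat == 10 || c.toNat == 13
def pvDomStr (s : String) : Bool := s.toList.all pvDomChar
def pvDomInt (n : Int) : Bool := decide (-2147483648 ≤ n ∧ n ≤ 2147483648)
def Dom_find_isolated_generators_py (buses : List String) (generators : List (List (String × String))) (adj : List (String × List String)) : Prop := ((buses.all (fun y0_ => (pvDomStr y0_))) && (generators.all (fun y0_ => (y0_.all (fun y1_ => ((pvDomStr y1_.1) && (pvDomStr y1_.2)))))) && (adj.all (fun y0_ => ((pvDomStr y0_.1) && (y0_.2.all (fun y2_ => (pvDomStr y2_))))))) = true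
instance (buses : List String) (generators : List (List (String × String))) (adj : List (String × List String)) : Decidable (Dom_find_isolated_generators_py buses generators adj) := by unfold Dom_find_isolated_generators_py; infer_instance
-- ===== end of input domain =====

-- B replaces A's loop-with-accumulator by structural recursion on the generator list,
-- consing each isolated name onto the recursive tail result (objective: alternative).


-- ===== PORT A =====
def find_isolated_generators_py (buses : List String) (generators : List (List (String × String))) (adj : List (String × List String)) : List String :=
  generators.foldl (fun isolated gen =>
    match (PySem.Dict.mk gen).get? "bus" with
    | none => isolated                              -- bus is None: both branches falsy
    | some bus =>
      if bus ≠ "" then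
        match (PySem.Dict.mk adj).get? bus with
        | some v =>                                 -- bus in adj
          if v = [] then isolated ++ [(PySem.Dict.mk gen).getD "name" bus]
          else isolated
        | none => isolated ++ [(PySem.Dict.mk gen).getD "name" bus]   -- elif bus
      else isolated) []

-- ===== PORT B =====
-- 'not adj.get(bus)' ⇔ the lookup with default [] yields [] (missing key or empty list)
def find_isolated_generators_py_alt (buses : List String) (generators : List (List (String × String))) (adj : List (String × List String)) : List String :=
  match generators with
  | [] => []
  | gen :: tail =>
    let rest := find_isolated_generators_py_alt buses tail adj
    match (PySem.Dict.mk gen).get? "bus" with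
    | none => rest
    | some bus =>
      if bus ≠ "" ∧ (PySem.Dict.mk adj).getD bus [] = [] then
        (PySem.Dict.mk gen).getD "name" bus :: rest
      else rest

-- ===== PRECONDITION & SPEC =====
def Spec_find_isolated_generators_py (buses : List String) (generators : List (List (String × String))) (adj : List (String × List String)) (out : List String) : Prop := out = find_isolated_generators_py_alt buses generators adj
instance (buses : List String) (generators : List (List (String × String))) (adj : List (String × List String)) (out : List String) : Decidable (Spec_find_isolated_generators_py buses generators adj out) := by unfold Spec_find_isolated_generators_py; infer_instance

-- ===== CLAIM =====
def Claim_equal_find_isolated_generators_py : Prop := ∀ (buses : List String) (generators : List (List (String × String))) (adj : List (String × List String)), Dom_find_isolated_generators_py buses generators adj → Spec_find_isolated_generators_py buses generators adj (find_isolated_generators_py buses generators adj)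

-- ===== LEMMAS AND PROOFS =====

-- A's fold from any accumulator equals the accumulator followed by B's recursive result.
lemma pv_alt_cons (buses : List String) (adj : List (String × List String))
    (gen : List (String × String)) (tail : List (List (String × String))) :
    find_isolated_generators_py_alt buses (gen :: tail) adj =
      (match (PySem.Dict.mk gen).get? "bus" with
       | none => find_isolated_generators_py_alt buses tail adj
       | some bus =>
         if bus ≠ "" ∧ (PySem.Dict.mk adj).getD bus [] = [] then
           (PySem.Dict.mk gen).getD "name" bus :: find_isolated_generators_py_alt buses tail adj
         else find_isolated_generators_py_alt buses tail adj) := rfl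

lemma pv_foldl_eq_acc_append (buses : List String) (adj : List (String × List String)) :
    ∀ (gens : List (List (String × String))) (acc : List String),
      gens.foldl (fun isolated gen =>
        match (PySem.Dict.mk gen).get? "bus" with
        | none => isolated
        | some bus =>
          if bus ≠ "" then
            match (PySem.Dict.mk adj).get? bus with
            | some v => if v = [] then isolated ++ [(PySem.Dict.mk gen).getD "name" bus] else isolated
            | none => isolated ++ [(PySem.Dict.mk gen).getD "name" bus]
          else isolated) acc
      = acc ++ find_isolated_generators_py_alt buses gens adj := by
  intro gens
  induction gens with
  | nil => intro acc; simp [find_isolated_generators_py_alt]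
  | cons gen tail ih =>
    intro acc
    rw [List.foldl_cons, ih, pv_alt_cons]
    generalize find_isolated_generators_py_alt buses tail adj = r
    cases hg : (PySem.Dict.mk gen).get? "bus" with
    | none => rfl
    | some bus =>
      dsimp only
      by_cases hb : bus = ""
      · simp [hb]
      · cases ha : (PySem.Dict.mk adj).get? bus with
        | none => simp [hb, PySem.Dict.getD_eq_get?_getD, ha]
        | some v =>
          by_cases hv : v = [] <;> simp [hb, PySem.Dict.getD_eq_get?_getD, ha, hv]

-- ===== VERDICT =====
theorem find_isolated_generators_py_spec : Claim_equal_find_isolated_generators_py := by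
  intro buses generators adj _
  unfold Spec_find_isolated_generators_py find_isolated_generators_py
  simpa using pv_foldl_eq_acc_append buses adj generators []
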